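-- pv_equiv track=rewrite | github.com/jxie0755/Learning_Python | LeetCode/p123_best_time_to_buy_and_sell_stock_iii.py | profitBreakdown
-- ===== SOURCE A (Python) =====
-- def profitBreakdown(prices):
--     if not prices:
--         return 0
--
--     profits = []
--     lo = 0
--     i = 1
--     foundprofit = False
--     while i != len(prices):
--         cur = prices[i]
--         prev = prices[i-1]
--         if cur <= prev:
--             if foundprofit:
--                 profits.append(prev - prices[lo])
--             lo = i
--             foundprofit = False
--         else:
--             foundprofit = True
--             if i == len(prices)-1:
--                 profits.append(cur - prices[lo])
--
--         i += 1
--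
--     return profits
-- ===== SOURCE B (Python) =====
-- def profitBreakdown(prices):
--     if not prices:
--         return 0
--     diffs = [prices[i] - prices[i - 1] for i in range(1, len(prices))]
--     out = []
--     run = 0
--     for d in diffs:
--         if d > 0:
--             run += d
--         else:
--             if run > 0:
--                 out.append(run)
--             run = 0
--     if run > 0:
--         out.append(run)
--     return out
-- ===== Notes on version B (the rewrite author's own statement) =====
-- stated objective: simpler
-- what changed: B replaces A's index/lo/foundprofit state machine by a scan over the consecutive-difference list that accumulates a running sum of positive diffs and flushes it at each non-positive diff and at the end.
-- outside the precondition, e.g. on profitBreakdown([]): A returns 0, B returns 0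
import Mathlib
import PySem

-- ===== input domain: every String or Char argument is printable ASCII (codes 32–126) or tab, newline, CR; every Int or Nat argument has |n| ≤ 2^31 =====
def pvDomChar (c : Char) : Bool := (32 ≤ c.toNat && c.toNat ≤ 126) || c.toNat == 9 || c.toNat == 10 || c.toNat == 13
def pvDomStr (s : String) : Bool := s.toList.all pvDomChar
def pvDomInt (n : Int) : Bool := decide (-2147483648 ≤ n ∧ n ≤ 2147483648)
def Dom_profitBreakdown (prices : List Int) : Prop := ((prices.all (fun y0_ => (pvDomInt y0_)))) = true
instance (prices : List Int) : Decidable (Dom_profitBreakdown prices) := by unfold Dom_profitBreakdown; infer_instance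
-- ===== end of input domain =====

-- B replaces A's index/lo/foundprofit state machine by a flush-on-drop scan of consecutive
-- differences; same O(n) cost, plainer decomposition.


-- ===== PORT A =====
-- Python's while loop over i, carrying the values prices[lo] (base) and prices[i-1] (prev)
-- instead of the indices; "i == len(prices)-1" is "rest = []".
def pvALoop (base prev : Int) (foundprofit : Bool) (profits : List Int) : List Int → List Int
  | [] => profits
  | cur :: rest =>
    if cur ≤ prev then
      pvALoop cur cur false (if foundprofit then profits ++ [prev - base] else profits) rest
    else
      pvALoop base cur true (if rest = [] then profits ++ [cur - base] else profits) rest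

def profitBreakdown (prices : List Int) : List Int :=
  match prices with
  | [] => []   -- Python returns the int 0 here, not a list; excluded by Pre_profitBreakdown
  | p :: rest => pvALoop p p false [] rest

-- ===== PORT B =====
def pvBLoop (run : Int) (out : List Int) : List Int → List Int
  | [] => if run > 0 then out ++ [run] else out
  | d :: ds =>
    if d > 0 then pvBLoop (run + d) out ds
    else pvBLoop 0 (if run > 0 then out ++ [run] else out) ds

def profitBreakdown_alt (prices : List Int) : List Int :=
  match prices with
  | [] => []   -- Python returns the int 0 here, not a list; excluded by Pre_profitBreakdown
  | _ :: _ => pvBLoop 0 [] (List.zipWith (· - ·) prices.tail prices)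

-- ===== PRECONDITION & SPEC =====
-- Pre_ excludes only the empty list, on which Python A (and B) return the int 0, not a list.
def Pre_profitBreakdown (prices : List Int) : Prop := prices ≠ []
instance (prices : List Int) : Decidable (Pre_profitBreakdown prices) := by unfold Pre_profitBreakdown; infer_instance
def pvWitness_profitBreakdown : List Int := [1, 2]

def Spec_profitBreakdown (prices : List Int) (out : List Int) : Prop := out = profitBreakdown_alt prices
instance (prices : List Int) (out : List Int) : Decidable (Spec_profitBreakdown prices out) := by unfold Spec_profitBreakdown; infer_instance

-- ===== CLAIM (what is proved, stated in full; the proofs are below) =====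
def Claim_equal_profitBreakdown : Prop := ∀ (prices : List Int), Dom_profitBreakdown prices → Pre_profitBreakdown prices → Spec_profitBreakdown prices (profitBreakdown prices)

-- ===== LEMMAS AND PROOFS =====

-- Invariant: A's state (base = prices[lo], prev, foundprofit = base < prev) corresponds to
-- B's running sum prev - base over the remaining diff list.
theorem pvLoop_eq (rest : List Int) : ∀ (base prev : Int) (profits : List Int),
    base ≤ prev → (rest = [] → base = prev) →
    pvALoop base prev (decide (base < prev)) profits rest
      = pvBLoop (prev - base) profits (List.zipWith (· - ·) rest (prev :: rest)) := by
  induction rest with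
  | nil =>
    intro base prev profits _ h
    have : base = prev := h rfl
    subst this
    simp [pvALoop, pvBLoop]
  | cons cur rest ih =>
    intro base prev profits hle hne
    by_cases hcp : cur ≤ prev
    · have hd : ¬ (cur - prev > 0) := by omega
      have hflush : (if base < prev then profits ++ [prev - base] else profits)
          = (if prev - base > 0 then profits ++ [prev - base] else profits) := by
        by_cases hb : base < prev
        · simp [hb]
        · simp [hb]
      have := ih cur cur (if base < prev then profits ++ [prev - base] else profits)
        le_rfl (fun _ => rfl)
      simp only [lt_self_iff_false, decide_false, sub_self] at this
      simp only [pvALoop, hcp, if_pos, List.zipWith, pvBLoop, hd, if_false,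
        decide_eq_true_eq]
      rw [hflush] at this
      simpa [hcp, hd] using this
    · have hlt : prev < cur := by omega
      have hd : cur - prev > 0 := by omega
      have hbc : base < cur := by omega
      cases rest with
      | nil =>
        simp [pvALoop, pvBLoop, hcp, hlt, hbc,
          show prev - base + (cur - prev) = cur - base from by ring]
      | cons x xs =>
        have ih' := ih base cur profits (le_of_lt hbc) (by simp)
        rw [show (decide (base < cur)) = true from by simpa using hbc] at ih'
        have h1 : pvALoop base prev (decide (base < prev)) profits (cur :: x :: xs)
            = pvALoop base cur true profits (x :: xs) := by
          simp only [pvALoop]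
          rw [if_neg hcp, if_neg (by simp : ¬(x :: xs = []))]
        have h2 : pvBLoop (prev - base) profits
              (List.zipWith (· - ·) (cur :: x :: xs) (prev :: cur :: x :: xs))
            = pvBLoop (cur - base) profits (List.zipWith (· - ·) (x :: xs) (cur :: x :: xs)) := by
          simp only [List.zipWith, pvBLoop]
          rw [if_pos hd, show prev - base + (cur - prev) = cur - base from by ring]
        rw [h1, h2, ih']

-- ===== VERDICT (by name: the statement is the Claim_ definition above) =====
theorem profitBreakdown_spec : Claim_equal_profitBreakdown := by
  intro prices _ hpre
  unfold Spec_profitBreakdown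
  match prices with
  | [] => exact absurd rfl hpre
  | p :: rest =>
    have h := pvLoop_eq rest p p [] le_rfl (fun _ => rfl)
    simp only [lt_self_iff_false, decide_false, sub_self] at h
    simpa [profitBreakdown, profitBreakdown_alt] using h
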